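-- pv_equiv track=rewrite | github.com/LegendaryGretl/AdventOfCode2023 | d3/gear_ratios.py | adjacent_num_locations
-- ===== SOURCE A (Python) =====
-- def adjacent_num_locations(array, center):
--     new_nums = []
--     for i in [-1, 0, 1]:
--         streak = False # use this var to make sure you aren't recording the same number twice
--         for j in [-1, 0, 1]:
--             if i == 0 and j == 0:
--                 streak = False
--                 continue
--             if ((center[0] + i) < 0) or ((center[0] + i) >= len(array)):
--                 streak = False
--                 continue
--             if ((center[1] + j) < 0) or ((center[1] + j) >= len(array)):
--                 streak = False
--                 continue
--             if (array[center[0] + i][center[1] + j]).isnumeric():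
--                 if not streak:
--                     new_nums.append([center[0] + i, center[1] + j])
--                 streak = True
--             else:
--                 streak = False
--     return new_nums
-- ===== SOURCE B (Python) =====
-- # For each bit pattern of numeric cells (bit 2 = j=-1, bit 1 = j=0, bit 0 = j=1),
-- # the column offsets at which a fresh number starts.
-- RUN_STARTS = {
--     0b000: [],
--     0b001: [1],
--     0b010: [0],
--     0b011: [0],
--     0b100: [-1],
--     0b101: [-1, 1],
--     0b110: [-1],
--     0b111: [-1],
-- }
--
--
-- def adjacent_num_locations(array, center):
--     r, c = center[0], center[1]
--     out = []
--     for i in (-1, 0, 1):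
--         mask = 0
--         for j in (-1, 0, 1):
--             if (i or j) and 0 <= r + i < len(array) and 0 <= c + j < len(array) \
--                     and array[r + i][c + j].isnumeric():
--                 mask += 1 << (1 - j)
--         for j in RUN_STARTS[mask]:
--             out.append([r + i, c + j])
--     return out
-- ===== Notes on version B (the rewrite author's own statement) =====
-- stated objective: alternative
-- what changed: Replaces A's streak-flag scan by a table-driven algorithm: each row's three neighbour cells are condensed into a 3-bit mask and the run-start columns are read off a precomputed RUN_STARTS lookup table.
-- outside the precondition, e.g. on adjacent_num_locations(['*'], [5]): A returns [], B raises IndexError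
import Mathlib
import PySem

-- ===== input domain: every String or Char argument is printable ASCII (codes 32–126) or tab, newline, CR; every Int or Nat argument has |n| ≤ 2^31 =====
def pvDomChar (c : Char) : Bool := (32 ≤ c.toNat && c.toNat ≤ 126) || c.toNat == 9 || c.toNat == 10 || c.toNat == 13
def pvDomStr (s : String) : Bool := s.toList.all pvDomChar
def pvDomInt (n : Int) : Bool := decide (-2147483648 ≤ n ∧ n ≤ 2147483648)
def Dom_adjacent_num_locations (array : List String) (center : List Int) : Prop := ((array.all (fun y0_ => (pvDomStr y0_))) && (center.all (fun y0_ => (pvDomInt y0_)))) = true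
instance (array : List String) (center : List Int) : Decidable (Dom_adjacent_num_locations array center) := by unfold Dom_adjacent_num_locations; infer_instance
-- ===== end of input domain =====

-- B replaces A's streak-flag scan by a table-driven algorithm: a 3-bit mask per row
-- looked up in a precomputed run-start table (alternative decomposition, no speed claim).

-- ===== PORT A =====
-- the body of A's inner `for j` loop, as a named step function (state = (new_nums, streak))
def pvStepA (array : List String) (center : List Int) (i : Int)
    (st : List (List Int) × Bool) (j : Int) : List (List Int) × Bool :=
  if i = 0 ∧ j = 0 then (st.1, false)
  else if ((PySem.List.pyGet? center 0).getD 0 + i < 0) ∨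
          ((array.length : Int) ≤ (PySem.List.pyGet? center 0).getD 0 + i) then (st.1, false)
  else if ((PySem.List.pyGet? center 1).getD 0 + j < 0) ∨
          ((array.length : Int) ≤ (PySem.List.pyGet? center 1).getD 0 + j) then (st.1, false)
  else if PySem.Chars.isdigit ((PySem.Str.pyGet?
            ((PySem.List.pyGet? array ((PySem.List.pyGet? center 0).getD 0 + i)).getD "")
            ((PySem.List.pyGet? center 1).getD 0 + j)).getD ' ') then
    (if !st.2 then
        st.1 ++ [[(PySem.List.pyGet? center 0).getD 0 + i, (PySem.List.pyGet? center 1).getD 0 + j]]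
      else st.1, true)
  else (st.1, false)

def adjacent_num_locations (array : List String) (center : List Int) : List (List Int) :=
  ([-1, 0, 1] : List Int).foldl
    (fun new_nums i =>
      (([-1, 0, 1] : List Int).foldl (pvStepA array center i) (new_nums, false)).1)
    []

-- ===== PORT B =====
-- the RUN_STARTS table (Python module-level dict)
def pvRunStarts : PySem.Dict Int (List Int) :=
  PySem.Dict.mk [(0, []), (1, [1]), (2, [0]), (3, [0]), (4, [-1]), (5, [-1, 1]), (6, [-1]), (7, [-1])]

-- body of B's mask-building loop; `mask += 1 << (1-j)` is exact as `+ 2 ^ (1-j).toNat` (j ≤ 1)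
def pvMaskStep (array : List String) (r c i : Int) (m : Int) (j : Int) : Int :=
  if (¬(i = 0 ∧ j = 0)) ∧ 0 ≤ r + i ∧ r + i < (array.length : Int) ∧
     0 ≤ c + j ∧ c + j < (array.length : Int) ∧
     PySem.Chars.isdigit ((PySem.Str.pyGet?
       ((PySem.List.pyGet? array (r + i)).getD "") (c + j)).getD ' ') = true
  then m + 2 ^ (1 - j).toNat else m

def adjacent_num_locations_alt (array : List String) (center : List Int) : List (List Int) :=
  let r := (PySem.List.pyGet? center 0).getD 0
  let c := (PySem.List.pyGet? center 1).getD 0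
  ([-1, 0, 1] : List Int).foldl (fun out i =>
    let mask := ([-1, 0, 1] : List Int).foldl (pvMaskStep array r c i) 0
    -- RUN_STARTS[mask]: the key is always present (mask ∈ 0..7), so getD [] is exact
    out ++ ((PySem.Dict.get? pvRunStarts mask).getD []).map (fun j => [r + i, c + j])) []

-- ===== PRECONDITION & SPEC =====
-- Pre_ excludes (a) the inputs where A raises IndexError reading a character past a
-- row's end, and (b) centers shorter than two entries (there B itself raises).
def Pre_adjacent_num_locations (array : List String) (center : List Int) : Prop :=
  2 ≤ center.length ∧
  ∀ i ∈ ([-1, 0, 1] : List Int), ∀ j ∈ ([-1, 0, 1] : List Int),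
    ¬(i = 0 ∧ j = 0) →
    0 ≤ (PySem.List.pyGet? center 0).getD 0 + i →
    (PySem.List.pyGet? center 0).getD 0 + i < (array.length : Int) →
    0 ≤ (PySem.List.pyGet? center 1).getD 0 + j →
    (PySem.List.pyGet? center 1).getD 0 + j < (array.length : Int) →
    (PySem.List.pyGet? center 1).getD 0 + j <
      (PySem.Str.len ((PySem.List.pyGet? array ((PySem.List.pyGet? center 0).getD 0 + i)).getD "") : Int)
instance (array : List String) (center : List Int) : Decidable (Pre_adjacent_num_locations array center) := by
  unfold Pre_adjacent_num_locations; infer_instance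
def pvWitness_adjacent_num_locations : List String × List Int := (["12", "4*"], [0, 1])

def Spec_adjacent_num_locations (array : List String) (center : List Int) (out : List (List Int)) : Prop := out = adjacent_num_locations_alt array center
instance (array : List String) (center : List Int) (out : List (List Int)) : Decidable (Spec_adjacent_num_locations array center out) := by unfold Spec_adjacent_num_locations; infer_instance

-- ===== CLAIM (what is proved, stated in full; the proofs are below) =====
def Claim_equal_adjacent_num_locations : Prop := ∀ (array : List String) (center : List Int), Dom_adjacent_num_locations array center → Pre_adjacent_num_locations array center → Spec_adjacent_num_locations array center (adjacent_num_locations array center)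

-- ===== LEMMAS AND PROOFS =====

-- the per-cell acceptance condition shared by both ports' step functions, as one boolean
def pvPA (array : List String) (r c i j : Int) : Bool :=
  if ¬(i = 0 ∧ j = 0) ∧ 0 ≤ r + i ∧ r + i < (array.length : Int) ∧
     0 ≤ c + j ∧ c + j < (array.length : Int) then
    PySem.Chars.isdigit ((PySem.Str.pyGet?
      ((PySem.List.pyGet? array (r + i)).getD "") (c + j)).getD ' ')
  else false

lemma pvStepA_eq (array : List String) (center : List Int) (i : Int)
    (st : List (List Int) × Bool) (j : Int) :
    pvStepA array center i st j =
      (if pvPA array ((PySem.List.pyGet? center 0).getD 0) ((PySem.List.pyGet? center 1).getD 0) i j then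
        (if !st.2 then
            st.1 ++ [[(PySem.List.pyGet? center 0).getD 0 + i, (PySem.List.pyGet? center 1).getD 0 + j]]
          else st.1, true)
      else (st.1, false)) := by
  unfold pvStepA pvPA
  split_ifs <;> simp_all <;> omega

lemma pvMaskStep_eq (array : List String) (r c i : Int) (m j : Int) :
    pvMaskStep array r c i m j =
      (if pvPA array r c i j then m + 2 ^ (1 - j).toNat else m) := by
  unfold pvMaskStep pvPA
  split_ifs <;> simp_all

lemma pvRowA (array : List String) (r c i : Int) (f : List (List Int) × Bool → Int → List (List Int) × Bool)
    (hf : ∀ st j, f st j = (if pvPA array r c i j then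
        (if !st.2 then st.1 ++ [[r + i, c + j]] else st.1, true) else (st.1, false)))
    (acc : List (List Int)) :
    (([-1, 0, 1] : List Int).foldl f (acc, false)).1 =
      acc ++ ((if pvPA array r c i (-1) then [[r + i, c + (-1)]] else []) ++
              (if pvPA array r c i 0 && !pvPA array r c i (-1) then [[r + i, c + 0]] else []) ++
              (if pvPA array r c i 1 && !pvPA array r c i 0 then [[r + i, c + 1]] else [])) := by
  simp only [List.foldl, hf]
  cases h1 : pvPA array r c i (-1) <;> cases h2 : pvPA array r c i 0 <;>
    cases h3 : pvPA array r c i 1 <;> simp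

lemma pvRowB (array : List String) (r c i : Int) :
    ((PySem.Dict.get? pvRunStarts
        (pvMaskStep array r c i (pvMaskStep array r c i (pvMaskStep array r c i 0 (-1)) 0) 1)).getD []).map
      (fun j => [r + i, c + j]) =
      ((if pvPA array r c i (-1) then [[r + i, c + (-1)]] else []) ++
       (if pvPA array r c i 0 && !pvPA array r c i (-1) then [[r + i, c + 0]] else []) ++
       (if pvPA array r c i 1 && !pvPA array r c i 0 then [[r + i, c + 1]] else [])) := by
  have e1 : ((1 : Int) - -1).toNat = 2 := by decide
  have e2 : ((1 : Int) - 0).toNat = 1 := by decide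
  have e3 : ((1 : Int) - 1).toNat = 0 := by decide
  simp only [pvMaskStep_eq, e1, e2, e3]
  cases h1 : pvPA array r c i (-1) <;> cases h2 : pvPA array r c i 0 <;>
    cases h3 : pvPA array r c i 1 <;>
    norm_num [pvRunStarts, PySem.Dict.get?_mk_cons]

-- ===== VERDICT (by name: the statement is the Claim_ definition above) =====
theorem adjacent_num_locations_spec : Claim_equal_adjacent_num_locations := by
  intro array center _hDom _hPre
  unfold Spec_adjacent_num_locations
  unfold adjacent_num_locations adjacent_num_locations_alt
  simp only [pvRowA array ((PySem.List.pyGet? center 0).getD 0) ((PySem.List.pyGet? center 1).getD 0) _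
      (pvStepA array center _) (fun st j => pvStepA_eq array center _ st j)]
  simp only [List.foldl]
  rw [pvRowB, pvRowB, pvRowB]
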